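-- pv_equiv track=rewrite | github.com/pbrown94949/advent-2023 | day12/main2.py | is_valid_hash_sequence
-- ===== SOURCE A (Python) =====
-- def is_valid_hash_sequence(string, require_leading_dot=True, require_trailing_dot=True):
--     if not require_leading_dot and not require_trailing_dot:
--         return is_hashes_or_queries(string)
--     if require_leading_dot:
--         if string[0] == '#':
--             return False
--         return is_valid_hash_sequence(string[1:], False, require_trailing_dot)
--     if require_trailing_dot:
--         if string[-1] == '#':
--             return False
--         return is_valid_hash_sequence(string[:-1], False, False)
--
-- def is_hashes_or_queries(string):
--     for char in string:
--         if char not in ['#', '?']: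
--             return False
--     return True
-- ===== SOURCE B (Python) =====
-- def is_valid_hash_sequence(string, require_leading_dot=True, require_trailing_dot=True):
--     if require_leading_dot:
--         if string[0] == '#':
--             return False
--         string = string[1:]
--     if require_trailing_dot:
--         if string[-1] == '#':
--             return False
--         string = string[:-1]
--     return all(c in '#?' for c in string)
-- ===== Notes on version B (the rewrite author's own statement) =====
-- stated objective: simpler
-- what changed: Replaces A's self-recursion through flag combinations (plus a separate scanning helper) with straight-line code: guard/strip the required leading and trailing positions in sequence, then one all() scan of the remainder.
import Mathlib
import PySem

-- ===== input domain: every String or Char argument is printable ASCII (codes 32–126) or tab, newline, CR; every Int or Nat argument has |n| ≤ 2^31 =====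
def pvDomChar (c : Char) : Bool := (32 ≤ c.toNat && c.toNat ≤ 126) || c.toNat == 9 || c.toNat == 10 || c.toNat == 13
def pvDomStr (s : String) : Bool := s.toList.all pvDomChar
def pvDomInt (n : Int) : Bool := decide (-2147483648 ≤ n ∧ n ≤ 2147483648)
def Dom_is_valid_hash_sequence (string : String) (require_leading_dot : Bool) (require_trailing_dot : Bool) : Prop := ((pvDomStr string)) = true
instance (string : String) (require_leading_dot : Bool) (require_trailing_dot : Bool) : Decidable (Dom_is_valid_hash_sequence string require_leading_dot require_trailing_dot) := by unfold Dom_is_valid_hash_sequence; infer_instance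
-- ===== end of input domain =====

-- B replaces A's three-way recursion with straight-line guard/strip steps and one final scan (objective: simpler).

-- ===== PORT A =====
-- helper is_hashes_or_queries: 'for char in string: if char not in ['#','?']: return False; return True'
def pvHOQLoop : List Char → Bool
  | [] => true
  | c :: rest => if ¬ (c = '#' ∨ c = '?') then false else pvHOQLoop rest

def is_hashes_or_queries (string : String) : Bool := pvHOQLoop string.toList

def is_valid_hash_sequence (string : String) (require_leading_dot : Bool) (require_trailing_dot : Bool) : Bool :=
  if !require_leading_dot && !require_trailing_dot then
    is_hashes_or_queries string
  else if require_leading_dot then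
    match PySem.Str.pyGet? string 0 with
    | none => false  -- Python raises IndexError here; excluded by Pre_
    | some c =>
      if c = '#' then false
      else is_valid_hash_sequence (PySem.Str.slice string (some 1) none) false require_trailing_dot
  else
    match PySem.Str.pyGet? string (-1) with
    | none => false  -- Python raises IndexError here; excluded by Pre_
    | some c =>
      if c = '#' then false
      else is_valid_hash_sequence (PySem.Str.slice string none (some (-1))) false false
termination_by (if require_leading_dot then 1 else 0) + (if require_trailing_dot then 1 else 0)
decreasing_by all_goals (cases require_leading_dot <;> cases require_trailing_dot <;> simp_all)

-- ===== PORT B =====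
def pvAllHashQuery (string : String) : Bool := string.toList.all (fun c => c == '#' || c == '?')

-- the trailing-dot guard/strip step followed by the final scan
def pvTrailStep (string : String) (require_trailing_dot : Bool) : Bool :=
  if require_trailing_dot then
    match PySem.Str.pyGet? string (-1) with
    | none => false  -- Python raises IndexError here; excluded by Pre_
    | some c =>
      if c = '#' then false
      else pvAllHashQuery (PySem.Str.slice string none (some (-1)))
  else pvAllHashQuery string

def is_valid_hash_sequence_alt (string : String) (require_leading_dot : Bool) (require_trailing_dot : Bool) : Bool :=
  if require_leading_dot then
    match PySem.Str.pyGet? string 0 with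
    | none => false  -- Python raises IndexError here; excluded by Pre_
    | some c =>
      if c = '#' then false
      else pvTrailStep (PySem.Str.slice string (some 1) none) require_trailing_dot
  else pvTrailStep string require_trailing_dot

-- ===== PRECONDITION & SPEC =====
-- Pre_ excludes exactly the inputs on which Python A raises IndexError: an empty string with a
-- required leading or trailing dot, and a one-character string with both dots required whose only
-- character is not a hash mark
-- (the recursion strips the first char and then indexes the empty remainder). B raises there too.
def Pre_is_valid_hash_sequence (string : String) (require_leading_dot : Bool) (require_trailing_dot : Bool) : Prop :=
  ¬ ((require_leading_dot = true ∧ string.toList = []) ∨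
     (require_trailing_dot = true ∧ string.toList = []) ∨
     (require_leading_dot = true ∧ require_trailing_dot = true ∧ string.toList.length = 1 ∧ string.toList[0]? ≠ some '#'))
instance (string : String) (require_leading_dot : Bool) (require_trailing_dot : Bool) : Decidable (Pre_is_valid_hash_sequence string require_leading_dot require_trailing_dot) := by unfold Pre_is_valid_hash_sequence; infer_instance

def pvWitness_is_valid_hash_sequence : String × Bool × Bool := (".#?.", true, true)

def Spec_is_valid_hash_sequence (string : String) (require_leading_dot : Bool) (require_trailing_dot : Bool) (out : Bool) : Prop := out = is_valid_hash_sequence_alt string require_leading_dot require_trailing_dot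
instance (string : String) (require_leading_dot : Bool) (require_trailing_dot : Bool) (out : Bool) : Decidable (Spec_is_valid_hash_sequence string require_leading_dot require_trailing_dot out) := by unfold Spec_is_valid_hash_sequence; infer_instance

-- ===== CLAIM (what is proved, stated in full; the proofs are below) =====
def Claim_equal_is_valid_hash_sequence : Prop := ∀ (string : String) (require_leading_dot : Bool) (require_trailing_dot : Bool), Dom_is_valid_hash_sequence string require_leading_dot require_trailing_dot → Pre_is_valid_hash_sequence string require_leading_dot require_trailing_dot → Spec_is_valid_hash_sequence string require_leading_dot require_trailing_dot (is_valid_hash_sequence string require_leading_dot require_trailing_dot)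

-- ===== LEMMAS AND PROOFS =====
theorem pvHOQLoop_eq_all (l : List Char) : pvHOQLoop l = l.all (fun c => c == '#' || c == '?') := by
  induction l with
  | nil => rfl
  | cons c rest ih =>
    simp only [pvHOQLoop, List.all_cons, ih]
    by_cases h : c = '#' ∨ c = '?' <;> simp_all

theorem pv_base (s : String) : is_valid_hash_sequence s false false = pvAllHashQuery s := by
  rw [is_valid_hash_sequence]
  simp [is_hashes_or_queries, pvAllHashQuery, pvHOQLoop_eq_all]

theorem pv_key (s : String) (trail : Bool) :
    is_valid_hash_sequence s false trail = pvTrailStep s trail := by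
  cases trail with
  | false => rw [pv_base]; simp [pvTrailStep]
  | true =>
    rw [is_valid_hash_sequence]
    simp only [pvTrailStep, Bool.not_false, Bool.not_true, Bool.and_false,
      if_neg (Bool.false_ne_true)]
    cases h : PySem.Str.pyGet? s (-1) with
    | none => rfl
    | some c =>
      by_cases hc : c = '#'
      · simp [hc]
      · simp [if_neg hc, pv_base]

-- ===== VERDICT (by name: the statement is the Claim_ definition above) =====
theorem is_valid_hash_sequence_spec : Claim_equal_is_valid_hash_sequence := by
  intro s lead trail _ _
  unfold Spec_is_valid_hash_sequence
  cases lead with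
  | false =>
    rw [is_valid_hash_sequence_alt]
    simp only [if_neg (Bool.false_ne_true)]
    exact pv_key s trail
  | true =>
    rw [is_valid_hash_sequence, is_valid_hash_sequence_alt]
    simp only [Bool.not_true, Bool.false_and, if_neg (Bool.false_ne_true)]
    cases h : PySem.Str.pyGet? s 0 with
    | none => rfl
    | some c =>
      by_cases hc : c = '#'
      · simp [hc]
      · simp only [if_neg hc]
        exact pv_key _ trail
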